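-- pv_equiv track=rewrite | github.com/pollmap/cufa-equity-report | skills/cufa-equity-report/preflight/dart_parser.py | split_cfs_ofs
-- ===== SOURCE A (Python) =====
-- from typing import Any, Iterable
--
-- def split_cfs_ofs(items: Iterable[dict[str, Any]]) -> tuple[list[dict], list[dict]]:
--     """DART 응답 rows를 연결/별도로 분리.
--
--     DART는 한 번의 호출에 CFS+OFS를 함께 반환하며, 같은 `sj_div` 안에
--     연결이 앞쪽 ord, 별도가 뒤쪽 ord로 섞여 있다. `ord` 기준 정렬 후
--     중간을 기준으로 분할한다.
--
--     Args:
--         items: 원본 row 리스트.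
--
--     Returns:
--         `(cfs_rows, ofs_rows)` 튜플.
--     """
--     rows = list(items)
--     cfs: list[dict] = []
--     ofs: list[dict] = []
--
--     for sj in ("IS", "BS", "CF"):
--         subset = sorted(
--             [r for r in rows if r.get("sj_div") == sj],
--             key=lambda r: int(r.get("ord", 0)),
--         )
--         if not subset:
--             continue
--
--         # 동일 계정명이 두 번 등장하면 1세트 크기를 파악해서 분할
--         seen: dict[str, int] = {}
--         split_idx = len(subset)
--         for idx, r in enumerate(subset):
--             name = r.get("account_nm", "")
--             if name in seen:
--                 split_idx = idx
--                 break
--             seen[name] = idx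
--
--         cfs.extend(subset[:split_idx])
--         ofs.extend(subset[split_idx:])
--
--     return cfs, ofs
-- ===== SOURCE B (Python) =====
-- from typing import Any, Iterable
--
--
-- def split_cfs_ofs(items: Iterable[dict[str, Any]]) -> tuple[list[dict], list[dict]]:
--     """One global stable sort by (statement rank, ord), then a single linear
--     sweep: a group boundary (sj_div change) resets the seen-names list and the
--     sticky duplicate flag; rows stream into cfs until the first repeated
--     account name of their group, then into ofs."""
--     _RANK = {"IS": 0, "BS": 1, "CF": 2}
--     ordered = sorted(
--         [r for r in items if r.get("sj_div") in _RANK],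
--         key=lambda r: (_RANK[r.get("sj_div")], int(r.get("ord", 0))),
--     )
--     cfs: list[dict] = []
--     ofs: list[dict] = []
--     names: list[str] = []
--     cur = None
--     dup = False
--     for r in ordered:
--         sj = r.get("sj_div")
--         if sj != cur:
--             cur, names, dup = sj, [], False
--         name = r.get("account_nm", "")
--         if dup or name in names:
--             dup = True
--             ofs.append(r)
--         else:
--             names.append(name)
--             cfs.append(r)
--     return cfs, ofs
-- ===== Notes on version B (the rewrite author's own statement) =====
-- stated objective: alternative
-- what changed: B replaces A's three filter-then-sort-then-index-split passes by one global stable sort keyed by (statement rank, ord) followed by a single linear sweep that detects group boundaries via sj_div changes and routes each row to cfs or ofs with a seen-names list and a sticky duplicate flag (no enumerate, no split index, no slicing).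
import Mathlib
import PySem

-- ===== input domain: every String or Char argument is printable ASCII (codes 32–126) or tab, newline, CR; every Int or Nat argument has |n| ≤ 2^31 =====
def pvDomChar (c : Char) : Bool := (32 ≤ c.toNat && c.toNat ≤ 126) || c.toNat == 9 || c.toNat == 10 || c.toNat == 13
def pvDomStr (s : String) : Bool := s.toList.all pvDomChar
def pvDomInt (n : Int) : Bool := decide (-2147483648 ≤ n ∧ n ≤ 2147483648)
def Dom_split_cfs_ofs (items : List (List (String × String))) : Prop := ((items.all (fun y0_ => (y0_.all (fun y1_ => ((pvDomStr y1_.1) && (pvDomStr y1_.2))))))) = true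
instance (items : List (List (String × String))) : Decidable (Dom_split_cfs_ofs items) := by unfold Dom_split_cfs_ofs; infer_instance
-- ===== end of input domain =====

-- B replaces A's three filter/sort/index-split passes by ONE global stable sort keyed by
-- (statement rank, ord) followed by a single linear sweep that detects group boundaries by
-- sj_div changes and routes rows with a seen-names list and a sticky duplicate flag
-- (objective: alternative decomposition, same cost).

-- r.get(k): first-match lookup in the row's association list (shared: both Pythons call dict.get)
def pvRowGet (r : List (String × String)) (k : String) : Option String :=
  PySem.Dict.get? ⟨r⟩ k

-- key component int(r.get("ord", 0)) — total under Pre_ (int() succeeds on every present "ord")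
def pvOrdKey (r : List (String × String)) : Int :=
  match pvRowGet r "ord" with
  | none => 0
  | some s => (PySem.Int.ofStr? s).getD 0

-- ===== PORT A =====
-- the for-idx loop with break: returns split_idx (total = len(subset) passed in)
def pvFindSplitA : List (List (String × String)) → PySem.Dict String Int → Int → Int → Int
  | [], _, _, total => total
  | r :: rest, seen, idx, total =>
    let name := (pvRowGet r "account_nm").getD ""
    if seen.contains name then idx
    else pvFindSplitA rest (seen.insert name idx) (idx + 1) total

def split_cfs_ofs (items : List (List (String × String))) : (List (List (String × String))) × (List (List (String × String))) :=
  let rows := items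
  (["IS", "BS", "CF"]).foldl
    (fun acc sj =>
      let subset := PySem.List.sorted (rows.filter (fun r => pvRowGet r "sj_div" == some sj)) pvOrdKey
      if subset.isEmpty then acc
      else
        let split_idx := pvFindSplitA subset PySem.Dict.empty 0 (subset.length : Int)
        (acc.1 ++ PySem.List.slice subset none (some split_idx),
         acc.2 ++ PySem.List.slice subset (some split_idx) none))
    ([], [])

-- ===== PORT B =====
-- _RANK = {"IS": 0, "BS": 1, "CF": 2}
def pvRankDict : PySem.Dict String Int := ⟨[("IS", 0), ("BS", 1), ("CF", 2)]⟩

-- r.get("sj_div") in _RANK  (None is never a key)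
def pvInRank (r : List (String × String)) : Bool :=
  match pvRowGet r "sj_div" with
  | some s => pvRankDict.contains s
  | none => false

-- _RANK[r.get("sj_div")] — the filter guarantees the key is present, so getD's default never fires
def pvRankKey (r : List (String × String)) : Int :=
  match pvRowGet r "sj_div" with
  | some s => pvRankDict.getD s 0
  | none => 0

-- one iteration of B's sweep; state = (cfs, ofs, names, cur, dup)
def pvStep (st : (List (List (String × String))) × (List (List (String × String))) × List String × Option String × Bool)
    (r : List (String × String)) :
    (List (List (String × String))) × (List (List (String × String))) × List String × Option String × Bool :=
  match st with
  | (cfs, ofs, names0, cur0, dup0) =>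
    let sj := pvRowGet r "sj_div"
    match (if sj != cur0 then (([] : List String), sj, false) else (names0, cur0, dup0)) with
    | (names, cur, dup) =>
      let name := (pvRowGet r "account_nm").getD ""
      if dup || names.contains name then (cfs, ofs ++ [r], names, cur, true)
      else (cfs ++ [r], ofs, names ++ [name], cur, dup)

def split_cfs_ofs_alt (items : List (List (String × String))) : (List (List (String × String))) × (List (List (String × String))) :=
  let ordered := PySem.List.sorted2 (items.filter pvInRank) pvRankKey pvOrdKey
  let st := ordered.foldl pvStep ([], [], [], none, false)
  (st.1, st.2.1)

-- ===== PRECONDITION & SPEC =====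
-- Pre_: A applies int() to the "ord" value of every row whose sj_div is IS/BS/CF and raises
-- ValueError when it does not parse; exactly those inputs are excluded (B raises there too).
def Pre_split_cfs_ofs (items : List (List (String × String))) : Prop :=
  ∀ r ∈ items, (pvRowGet r "sj_div" = some "IS" ∨ pvRowGet r "sj_div" = some "BS" ∨ pvRowGet r "sj_div" = some "CF") →
    ∀ s, pvRowGet r "ord" = some s → (PySem.Int.ofStr? s).isSome

instance (items : List (List (String × String))) : Decidable (Pre_split_cfs_ofs items) := by unfold Pre_split_cfs_ofs; infer_instance

def pvWitness_split_cfs_ofs : (List (List (String × String))) :=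
  [[("sj_div", "IS"), ("account_nm", "a"), ("ord", "2")],
   [("sj_div", "IS"), ("account_nm", "a"), ("ord", "1")],
   [("sj_div", "BS"), ("account_nm", "b")]]

def Spec_split_cfs_ofs (items : List (List (String × String))) (out : (List (List (String × String))) × (List (List (String × String)))) : Prop := out = split_cfs_ofs_alt items
instance (items : List (List (String × String))) (out : (List (List (String × String))) × (List (List (String × String)))) : Decidable (Spec_split_cfs_ofs items out) := by unfold Spec_split_cfs_ofs; infer_instance

-- ===== CLAIM (what is proved, stated in full; the proofs are below) =====
def Claim_equal_split_cfs_ofs : Prop := ∀ (items : List (List (String × String))), Dom_split_cfs_ofs items → Pre_split_cfs_ofs items → Spec_split_cfs_ofs items (split_cfs_ofs items)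

-- ===== LEMMAS AND PROOFS =====

-- abbreviations used only by the proofs
def pvIsSj (s : String) (r : List (String × String)) : Bool := pvRowGet r "sj_div" == some s
def pvLexLt (a b : List (String × String)) : Bool :=
  decide (pvRankKey a < pvRankKey b) || (!decide (pvRankKey b < pvRankKey a) && decide (pvOrdKey a < pvOrdKey b))
def pvOrdLt (a b : List (String × String)) : Bool := decide (pvOrdKey a < pvOrdKey b)

-- inserting x walks past a prefix it never goes before
theorem pv_insertBy_false_prefix {α : Type} (b : α → α → Bool) (x : α) (l1 l2 : List α)
    (h : ∀ y ∈ l1, b x y = false) :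
    PySem.List.insertBy b x (l1 ++ l2) = l1 ++ PySem.List.insertBy b x l2 := by
  induction l1 with
  | nil => rfl
  | cons y t ih =>
    simp [PySem.List.insertBy, h y (by simp)]
    exact ih (fun z hz => h z (by simp [hz]))

-- inserting x into l2 ++ l3 when x goes before all of l3 and b agrees with b' on l2
theorem pv_insertBy_true_suffix {α : Type} (b b' : α → α → Bool) (x : α) (l2 l3 : List α)
    (h2 : ∀ y ∈ l2, b x y = b' x y) (h3 : ∀ y ∈ l3, b x y = true) :
    PySem.List.insertBy b x (l2 ++ l3) = PySem.List.insertBy b' x l2 ++ l3 := by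
  induction l2 with
  | nil =>
    cases l3 with
    | nil => rfl
    | cons y t => simp [PySem.List.insertBy, h3 y (by simp)]
  | cons y t ih =>
    have hy := h2 y (by simp)
    by_cases hb : b' x y = true
    · simp [PySem.List.insertBy, hy, hb]
    · simp [PySem.List.insertBy, hy, hb]
      exact ih (fun z hz => h2 z (by simp [hz]))

theorem pv_inRank_cases (r : List (String × String)) (h : pvInRank r = true) :
    pvRowGet r "sj_div" = some "IS" ∨ pvRowGet r "sj_div" = some "BS" ∨ pvRowGet r "sj_div" = some "CF" := by
  unfold pvInRank at h
  rcases hg : pvRowGet r "sj_div" with _ | s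
  · rw [hg] at h; exact absurd h (by simp)
  · rw [hg] at h
    simp [pvRankDict, PySem.Dict.contains] at h
    rcases h with h | h | h <;> simp [h]

theorem pv_rank_IS (r : List (String × String)) (h : pvRowGet r "sj_div" = some "IS") : pvRankKey r = 0 := by
  simp [pvRankKey, h, pvRankDict, PySem.Dict.getD, PySem.Dict.get?]
theorem pv_rank_BS (r : List (String × String)) (h : pvRowGet r "sj_div" = some "BS") : pvRankKey r = 1 := by
  simp [pvRankKey, h, pvRankDict, PySem.Dict.getD, PySem.Dict.get?]
theorem pv_rank_CF (r : List (String × String)) (h : pvRowGet r "sj_div" = some "CF") : pvRankKey r = 2 := by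
  simp [pvRankKey, h, pvRankDict, PySem.Dict.getD, PySem.Dict.get?]

-- the global lex-keyed insertion sort splits into the three rank segments
theorem pv_sorted2_tri (xs a0 a1 a2 : List (List (String × String)))
    (hx : ∀ r ∈ xs, pvInRank r = true)
    (h0 : ∀ r ∈ a0, pvRowGet r "sj_div" = some "IS")
    (h1 : ∀ r ∈ a1, pvRowGet r "sj_div" = some "BS")
    (h2 : ∀ r ∈ a2, pvRowGet r "sj_div" = some "CF") :
    xs.foldl (fun acc x => PySem.List.insertBy pvLexLt x acc) (a0 ++ a1 ++ a2)
    = (xs.filter (pvIsSj "IS")).foldl (fun acc x => PySem.List.insertBy pvOrdLt x acc) a0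
      ++ (xs.filter (pvIsSj "BS")).foldl (fun acc x => PySem.List.insertBy pvOrdLt x acc) a1
      ++ (xs.filter (pvIsSj "CF")).foldl (fun acc x => PySem.List.insertBy pvOrdLt x acc) a2 := by
  induction xs generalizing a0 a1 a2 with
  | nil => simp
  | cons x xs ih =>
    have hxs : ∀ r ∈ xs, pvInRank r = true := fun r hr => hx r (by simp [hr])
    rcases pv_inRank_cases x (hx x (by simp)) with hsx | hsx | hsx
    · have hins : PySem.List.insertBy pvLexLt x (a0 ++ a1 ++ a2)
          = PySem.List.insertBy pvOrdLt x a0 ++ a1 ++ a2 := by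
        rw [List.append_assoc, pv_insertBy_true_suffix pvLexLt pvOrdLt x a0 (a1 ++ a2)
          (fun y hy => by simp [pvLexLt, pvOrdLt, pv_rank_IS x hsx, pv_rank_IS y (h0 y hy)])
          (fun y hy => by
            rcases List.mem_append.mp hy with hy | hy
            · simp [pvLexLt, pv_rank_IS x hsx, pv_rank_BS y (h1 y hy)]
            · simp [pvLexLt, pv_rank_IS x hsx, pv_rank_CF y (h2 y hy)]),
          ← List.append_assoc]
      have hfIS : (x :: xs).filter (pvIsSj "IS") = x :: xs.filter (pvIsSj "IS") := by
        simp [pvIsSj, hsx]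
      have hfBS : (x :: xs).filter (pvIsSj "BS") = xs.filter (pvIsSj "BS") := by
        simp [pvIsSj, hsx]
      have hfCF : (x :: xs).filter (pvIsSj "CF") = xs.filter (pvIsSj "CF") := by
        simp [pvIsSj, hsx]
      rw [hfIS, hfBS, hfCF, List.foldl_cons, List.foldl_cons, hins]
      exact ih (PySem.List.insertBy pvOrdLt x a0) a1 a2 hxs
        (fun y hy => by
          rcases (PySem.List.mem_insertBy pvOrdLt x y _).mp hy with h | h
          · rw [h]; exact hsx
          · exact h0 y h) h1 h2
    · have hins : PySem.List.insertBy pvLexLt x (a0 ++ a1 ++ a2)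
          = a0 ++ PySem.List.insertBy pvOrdLt x a1 ++ a2 := by
        rw [List.append_assoc,
          pv_insertBy_false_prefix pvLexLt x a0 (a1 ++ a2)
            (fun y hy => by simp [pvLexLt, pv_rank_BS x hsx, pv_rank_IS y (h0 y hy)]),
          pv_insertBy_true_suffix pvLexLt pvOrdLt x a1 a2
            (fun y hy => by simp [pvLexLt, pvOrdLt, pv_rank_BS x hsx, pv_rank_BS y (h1 y hy)])
            (fun y hy => by simp [pvLexLt, pv_rank_BS x hsx, pv_rank_CF y (h2 y hy)]),
          ← List.append_assoc]
      have hfIS : (x :: xs).filter (pvIsSj "IS") = xs.filter (pvIsSj "IS") := by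
        simp [pvIsSj, hsx]
      have hfBS : (x :: xs).filter (pvIsSj "BS") = x :: xs.filter (pvIsSj "BS") := by
        simp [pvIsSj, hsx]
      have hfCF : (x :: xs).filter (pvIsSj "CF") = xs.filter (pvIsSj "CF") := by
        simp [pvIsSj, hsx]
      rw [hfIS, hfBS, hfCF, List.foldl_cons, List.foldl_cons, hins]
      exact ih a0 (PySem.List.insertBy pvOrdLt x a1) a2 hxs h0
        (fun y hy => by
          rcases (PySem.List.mem_insertBy pvOrdLt x y _).mp hy with h | h
          · rw [h]; exact hsx
          · exact h1 y h) h2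
    · have hins : PySem.List.insertBy pvLexLt x (a0 ++ a1 ++ a2)
          = a0 ++ a1 ++ PySem.List.insertBy pvOrdLt x a2 := by
        have h12 : ∀ y ∈ a0 ++ a1, pvLexLt x y = false := by
          intro y hy
          rcases List.mem_append.mp hy with hy | hy
          · simp [pvLexLt, pv_rank_CF x hsx, pv_rank_IS y (h0 y hy)]
          · simp [pvLexLt, pv_rank_CF x hsx, pv_rank_BS y (h1 y hy)]
        rw [pv_insertBy_false_prefix pvLexLt x (a0 ++ a1) a2 h12]
        have := pv_insertBy_true_suffix pvLexLt pvOrdLt x a2 []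
          (fun y hy => by simp [pvLexLt, pvOrdLt, pv_rank_CF x hsx, pv_rank_CF y (h2 y hy)])
          (fun y hy => by simp at hy)
        simp only [List.append_nil] at this
        rw [this]
      have hfIS : (x :: xs).filter (pvIsSj "IS") = xs.filter (pvIsSj "IS") := by
        simp [pvIsSj, hsx]
      have hfBS : (x :: xs).filter (pvIsSj "BS") = xs.filter (pvIsSj "BS") := by
        simp [pvIsSj, hsx]
      have hfCF : (x :: xs).filter (pvIsSj "CF") = x :: xs.filter (pvIsSj "CF") := by
        simp [pvIsSj, hsx]
      rw [hfIS, hfBS, hfCF, List.foldl_cons, List.foldl_cons, hins]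
      exact ih a0 a1 (PySem.List.insertBy pvOrdLt x a2) hxs h0 h1
        (fun y hy => by
          rcases (PySem.List.mem_insertBy pvOrdLt x y _).mp hy with h | h
          · rw [h]; exact hsx
          · exact h2 y h)

theorem pvStep_same (r : List (String × String)) (s : String) (hr : pvRowGet r "sj_div" = some s)
    (cfs ofs : List (List (String × String))) (names : List String) (dup : Bool) :
    pvStep (cfs, ofs, names, some s, dup) r =
      if dup || names.contains ((pvRowGet r "account_nm").getD "") then (cfs, ofs ++ [r], names, some s, true)
      else (cfs ++ [r], ofs, names ++ [(pvRowGet r "account_nm").getD ""], some s, dup) := by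
  simp [pvStep, hr]

theorem pvStep_reset (r : List (String × String)) (s : String) (hr : pvRowGet r "sj_div" = some s)
    (cfs ofs : List (List (String × String))) (names : List String) (cur : Option String) (dup : Bool)
    (hcur : cur ≠ some s) :
    pvStep (cfs, ofs, names, cur, dup) r = (cfs ++ [r], ofs, [(pvRowGet r "account_nm").getD ""], some s, false) := by
  have : (some s != cur) = true := by simp [bne, Ne.symm hcur]
  simp [pvStep, hr, this]

-- the sweep with the duplicate flag set drains the rest of the group into ofs
theorem pv_drain (l : List (List (String × String))) (s : String)
    (hl : ∀ r ∈ l, pvRowGet r "sj_div" = some s)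
    (cfs ofs : List (List (String × String))) (names : List String) :
    l.foldl pvStep (cfs, ofs, names, some s, true) = (cfs, ofs ++ l, names, some s, true) := by
  induction l generalizing ofs with
  | nil => simp
  | cons r rest ih =>
    have hr := hl r (by simp)
    rw [List.foldl_cons, pvStep_same r s hr, if_pos (by simp),
      ih (fun z hz => hl z (by simp [hz])) (ofs ++ [r])]
    simp

-- A's indexed dup-search agrees with B's in-group sweep
theorem pv_group_agree (l : List (List (String × String))) (s : String)
    (hl : ∀ r ∈ l, pvRowGet r "sj_div" = some s)
    (seenD : PySem.Dict String Int) (names : List String) (idx : Int)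
    (h : ∀ n : String, seenD.contains n = names.contains n) :
    ∃ j : Nat, pvFindSplitA l seenD idx (idx + l.length) = idx + j ∧
      ∀ cfs ofs, ∃ names' dup',
        l.foldl pvStep (cfs, ofs, names, some s, false)
          = (cfs ++ l.take j, ofs ++ l.drop j, names', some s, dup') := by
  induction l generalizing seenD names idx with
  | nil =>
    refine ⟨0, by simp [pvFindSplitA], ?_⟩
    intro cfs ofs; exact ⟨names, false, by simp⟩
  | cons r rest ih =>
    have hr := hl r (by simp)
    by_cases hc : seenD.contains ((pvRowGet r "account_nm").getD "") = true
    · have hc' : names.contains ((pvRowGet r "account_nm").getD "") = true := by rw [← h]; exact hc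
      have hmem : (pvRowGet r "account_nm").getD "" ∈ names := by simpa using hc'
      refine ⟨0, by simp [pvFindSplitA, hc], ?_⟩
      intro cfs ofs
      refine ⟨names, true, ?_⟩
      rw [List.foldl_cons, pvStep_same r s hr, if_pos (by simp [hmem]),
        pv_drain rest s (fun z hz => hl z (by simp [hz])) cfs (ofs ++ [r]) names]
      simp
    · have hcb : seenD.contains ((pvRowGet r "account_nm").getD "") = false := by simpa using hc
      have hc' : names.contains ((pvRowGet r "account_nm").getD "") = false := by rw [← h]; exact hcb
      obtain ⟨j, hj1, hj2⟩ := ih (fun z hz => hl z (by simp [hz]))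
        (seenD.insert ((pvRowGet r "account_nm").getD "") idx)
        (names ++ [(pvRowGet r "account_nm").getD ""]) (idx + 1)
        (by intro n; rw [PySem.Dict.contains_insert]
            by_cases hn : n = (pvRowGet r "account_nm").getD "" <;> simp [h n, hn, Bool.or_comm])
      refine ⟨j + 1, ?_, ?_⟩
      · have htot : idx + ((r :: rest).length : Int) = (idx + 1) + (rest.length : Int) := by
          simp only [List.length_cons]; push_cast; omega
        rw [htot]
        simp only [pvFindSplitA]
        rw [if_neg (by simp [hcb]), hj1]
        push_cast; ring
      · intro cfs ofs
        obtain ⟨names', dup', hf⟩ := hj2 (cfs ++ [r]) ofs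
        refine ⟨names', dup', ?_⟩
        have hnm : (pvRowGet r "account_nm").getD "" ∉ names := by simpa using hc'
        rw [List.foldl_cons, pvStep_same r s hr, if_neg (by simp [hnm]), hf]
        simp [List.take_succ_cons, List.drop_succ_cons]

-- A's per-statement step (acc extended by the two slices of one sorted bucket), proof-side name
def pvAstep (acc : (List (List (String × String))) × (List (List (String × String))))
    (S : List (List (String × String))) :
    (List (List (String × String))) × (List (List (String × String))) :=
  if S.isEmpty then acc
  else (acc.1 ++ PySem.List.slice S none (some (pvFindSplitA S PySem.Dict.empty 0 (S.length : Int))),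
        acc.2 ++ PySem.List.slice S (some (pvFindSplitA S PySem.Dict.empty 0 (S.length : Int))) none)

-- B's sweep over one sorted bucket equals A's guarded slice-extend step
theorem pv_stage (S : List (List (String × String))) (s : String)
    (hS : ∀ r ∈ S, pvRowGet r "sj_div" = some s)
    (cfs ofs : List (List (String × String))) (names : List String) (cur : Option String) (dup : Bool)
    (hcur : cur ≠ some s) :
    ∃ names' cur' dup',
      S.foldl pvStep (cfs, ofs, names, cur, dup)
        = ((pvAstep (cfs, ofs) S).1, (pvAstep (cfs, ofs) S).2, names', cur', dup')
      ∧ (cur' = some s ∨ cur' = cur) := by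
  cases S with
  | nil => exact ⟨names, cur, dup, by simp [pvAstep], Or.inr rfl⟩
  | cons r rest =>
    have hr := hS r (by simp)
    have hseen : ∀ n : String,
        ((PySem.Dict.empty : PySem.Dict String Int).insert ((pvRowGet r "account_nm").getD "") 0).contains n
          = ([(pvRowGet r "account_nm").getD ""] : List String).contains n := by
      intro n; rw [PySem.Dict.contains_insert]
      by_cases hn : n = (pvRowGet r "account_nm").getD "" <;>
        simp [hn, PySem.Dict.contains, PySem.Dict.empty]
    obtain ⟨j, hj1, hj2⟩ := pv_group_agree rest s (fun z hz => hS z (by simp [hz])) _ _ 1 hseen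
    obtain ⟨names', dup', hf⟩ := hj2 (cfs ++ [r]) ofs
    refine ⟨names', some s, dup', ?_, Or.inl rfl⟩
    rw [List.foldl_cons, pvStep_reset r s hr cfs ofs names cur dup hcur, hf]
    have hsplit : pvFindSplitA (r :: rest) PySem.Dict.empty 0 (((r :: rest).length : Nat) : Int) = 1 + j := by
      have htot : (((r :: rest).length : Nat) : Int) = 0 + 1 + (rest.length : Int) := by
        simp only [List.length_cons]; push_cast; ring
      rw [htot]
      simp only [pvFindSplitA]
      rw [if_neg (by simp [PySem.Dict.contains, PySem.Dict.empty])]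
      rw [show (0 : Int) + 1 = 1 by ring] at *
      rw [hj1]
    simp only [pvAstep]
    rw [if_neg (by simp)]
    rw [hsplit, PySem.List.slice_to _ (by omega), PySem.List.slice_from _ (by omega)]
    have hj : ((1 : Int) + (j : Int)).toNat = j + 1 := by omega
    simp [hj, List.take_succ_cons, List.drop_succ_cons]

-- sorted2 of the rank-filtered rows is the concatenation of A's three sorted buckets
theorem pv_sorted2_eq (items : List (List (String × String))) :
    PySem.List.sorted2 (items.filter pvInRank) pvRankKey pvOrdKey
    = PySem.List.sorted (items.filter (pvIsSj "IS")) pvOrdKey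
      ++ PySem.List.sorted (items.filter (pvIsSj "BS")) pvOrdKey
      ++ PySem.List.sorted (items.filter (pvIsSj "CF")) pvOrdKey := by
  have hsub : ∀ s : String, s = "IS" ∨ s = "BS" ∨ s = "CF" →
      (items.filter pvInRank).filter (pvIsSj s) = items.filter (pvIsSj s) := by
    intro s hs
    rw [List.filter_filter]
    refine List.filter_congr (fun a _ => ?_)
    by_cases hp : pvIsSj s a = true
    · have hg : pvRowGet a "sj_div" = some s := by
        have := hp; simp only [pvIsSj, beq_iff_eq] at this; exact this
      have : pvInRank a = true := by
        rcases hs with h | h | h <;> subst h <;>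
          simp [pvInRank, hg, pvRankDict, PySem.Dict.contains]
      simp [hp, this]
    · simp [Bool.eq_false_iff.mpr hp]
  have hx : ∀ r ∈ items.filter pvInRank, pvInRank r = true := fun r hr => (List.mem_filter.mp hr).2
  have h := pv_sorted2_tri (items.filter pvInRank) [] [] [] hx (by simp) (by simp) (by simp)
  simp only [List.append_nil] at h
  rw [hsub "IS" (by simp), hsub "BS" (by simp), hsub "CF" (by simp)] at h
  exact h

theorem split_cfs_ofs_spec : Claim_equal_split_cfs_ofs := by
  intro items _ _
  show split_cfs_ofs items = split_cfs_ofs_alt items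
  have memS : ∀ s : String, ∀ r ∈ PySem.List.sorted (items.filter (pvIsSj s)) pvOrdKey,
      pvRowGet r "sj_div" = some s := by
    intro s r hr
    have := (List.mem_filter.mp ((PySem.List.mem_sorted _ _ _ _).mp hr)).2
    simpa [pvIsSj] using this
  have hB : split_cfs_ofs_alt items
      = (((PySem.List.sorted (items.filter (pvIsSj "CF")) pvOrdKey).foldl pvStep ((PySem.List.sorted (items.filter (pvIsSj "BS")) pvOrdKey).foldl pvStep ((PySem.List.sorted (items.filter (pvIsSj "IS")) pvOrdKey).foldl pvStep ([], [], [], none, false)))).1, ((PySem.List.sorted (items.filter (pvIsSj "CF")) pvOrdKey).foldl pvStep ((PySem.List.sorted (items.filter (pvIsSj "BS")) pvOrdKey).foldl pvStep ((PySem.List.sorted (items.filter (pvIsSj "IS")) pvOrdKey).foldl pvStep ([], [], [], none, false)))).2.1) := by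
    simp only [split_cfs_ofs_alt]
    rw [pv_sorted2_eq items, List.foldl_append, List.foldl_append]
  rw [hB]
  obtain ⟨n1, c1, d1, h1, hc1⟩ :=
    pv_stage (PySem.List.sorted (items.filter (pvIsSj "IS")) pvOrdKey) "IS" (memS "IS")
      [] [] [] none false (by simp)
  obtain ⟨n2, c2, d2, h2, hc2⟩ :=
    pv_stage (PySem.List.sorted (items.filter (pvIsSj "BS")) pvOrdKey) "BS" (memS "BS")
      (pvAstep ([], []) (PySem.List.sorted (items.filter (pvIsSj "IS")) pvOrdKey)).1
      (pvAstep ([], []) (PySem.List.sorted (items.filter (pvIsSj "IS")) pvOrdKey)).2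
      n1 c1 d1 (by rcases hc1 with h | h <;> simp [h])
  obtain ⟨n3, c3, d3, h3, hc3⟩ :=
    pv_stage (PySem.List.sorted (items.filter (pvIsSj "CF")) pvOrdKey) "CF" (memS "CF")
      (pvAstep ((pvAstep ([], []) (PySem.List.sorted (items.filter (pvIsSj "IS")) pvOrdKey)).1,
                (pvAstep ([], []) (PySem.List.sorted (items.filter (pvIsSj "IS")) pvOrdKey)).2)
        (PySem.List.sorted (items.filter (pvIsSj "BS")) pvOrdKey)).1
      (pvAstep ((pvAstep ([], []) (PySem.List.sorted (items.filter (pvIsSj "IS")) pvOrdKey)).1,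
                (pvAstep ([], []) (PySem.List.sorted (items.filter (pvIsSj "IS")) pvOrdKey)).2)
        (PySem.List.sorted (items.filter (pvIsSj "BS")) pvOrdKey)).2
      n2 c2 d2
      (by rcases hc2 with h | h
          · simp [h]
          · rcases hc1 with h' | h' <;> simp [h, h'])
  rw [h1, h2, h3]
  rfl
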